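-- pv_equiv track=rewrite | github.com/Daniel14o/PythonModuloDos | Ejercicios/Ejercicio8.py | procesar_lista
-- ===== SOURCE A (Python) =====
-- from typing import List, Tuple
--
-- def procesar_lista(numeros: List[int]) -> Tuple[List[int], List[int], List[str], List[int]]:
--     """
--     Procesa una lista de números para generar:
--     1. Una lista con solo los números positivos.
--     2. Una lista con solo los números negativos.
--     3. Una lista con los cuadrados de todos los números.
--     4. Una lista de strings "positivo" o "negativo" para cada número.
--
--     Parámetros:
--         numeros (List[int]): Lista de números enteros.
--
--     Retorna:
--         Tuple[List[int], List[int], List[int], List[str]]: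
--             - Lista de positivos.
--             - Lista de negativos.
--             - Lista de cuadrados.
--             - Lista de etiquetas "positivo"/"negativo".
--     """
--     # Validar que todos sean enteros
--     for n in numeros:
--         if not isinstance(n, int):
--             raise ValueError("Solo numeros enteros")
--
--     positivos = [n for n in numeros if n > 0]
--     negativos = [n for n in numeros if n < 0]
--     cuadrados = [n**2 for n in numeros]
--     etiquetas = ["positivo" if n > 0 else "negativo" for n in numeros]
--
--     return positivos, negativos, cuadrados, etiquetas
-- ===== SOURCE B (Python) =====
-- from typing import List, Tuple
--
-- def procesar_lista(numeros: List[int]) -> Tuple[List[int], List[int], List[str], List[int]]: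
--     # Validation pre-pass kept separate so exception timing matches the original
--     for n in numeros:
--         if not isinstance(n, int):
--             raise ValueError("Solo numeros enteros")
--
--     positivos, negativos, cuadrados, etiquetas = [], [], [], []
--     for n in numeros:
--         if n > 0:
--             positivos.append(n)
--             etiquetas.append("positivo")
--         else:
--             etiquetas.append("negativo")
--             if n < 0:
--                 negativos.append(n)
--         cuadrados.append(n * n)
--     return positivos, negativos, cuadrados, etiquetas
-- ===== Notes on version B (the rewrite author's own statement) =====
-- stated objective: simpler
-- what changed: Replaces A's four separate comprehension traversals with one single-pass loop maintaining the four result lists simultaneously.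
import Mathlib
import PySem

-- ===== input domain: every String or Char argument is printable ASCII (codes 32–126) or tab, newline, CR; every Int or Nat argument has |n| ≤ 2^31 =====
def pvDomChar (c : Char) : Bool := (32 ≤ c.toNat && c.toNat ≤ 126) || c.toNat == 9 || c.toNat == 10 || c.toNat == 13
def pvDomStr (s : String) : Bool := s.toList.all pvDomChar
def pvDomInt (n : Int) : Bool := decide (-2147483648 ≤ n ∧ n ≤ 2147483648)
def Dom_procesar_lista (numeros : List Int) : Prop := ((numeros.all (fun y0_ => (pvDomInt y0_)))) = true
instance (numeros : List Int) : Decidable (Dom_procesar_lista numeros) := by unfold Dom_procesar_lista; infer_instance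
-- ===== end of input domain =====

-- B replaces A's four comprehension passes with one single-pass loop over the list; objective: simpler.

-- ===== PORT A =====
-- A: four independent comprehensions (the isinstance validation never fires on List Int)
def procesar_lista (numeros : List Int) : List Int × List Int × List Int × List String :=
  (numeros.filter (fun n => decide (n > 0)),
   numeros.filter (fun n => decide (n < 0)),
   numeros.map (fun n => n ^ 2),
   numeros.map (fun n => if n > 0 then "positivo" else "negativo"))

-- ===== PORT B =====
-- B: one loop appending to four accumulators
def procesarLoop : List Int → List Int → List Int → List Int → List String →
    List Int × List Int × List Int × List String
  | [], pos, neg, cuad, et => (pos, neg, cuad, et)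
  | n :: rest, pos, neg, cuad, et =>
      if n > 0 then
        procesarLoop rest (pos ++ [n]) neg (cuad ++ [n * n]) (et ++ ["positivo"])
      else
        procesarLoop rest pos (if n < 0 then neg ++ [n] else neg) (cuad ++ [n * n]) (et ++ ["negativo"])

def procesar_lista_alt (numeros : List Int) : List Int × List Int × List Int × List String :=
  procesarLoop numeros [] [] [] []

-- ===== PRECONDITION & SPEC =====
def Spec_procesar_lista (numeros : List Int) (out : List Int × List Int × List Int × List String) : Prop := out = procesar_lista_alt numeros
instance (numeros : List Int) (out : List Int × List Int × List Int × List String) : Decidable (Spec_procesar_lista numeros out) := by unfold Spec_procesar_lista; infer_instance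

-- ===== CLAIM (what is proved, stated in full; the proofs are below) =====
def Claim_equal_procesar_lista : Prop := ∀ (numeros : List Int), Dom_procesar_lista numeros → Spec_procesar_lista numeros (procesar_lista numeros)

-- ===== LEMMAS AND PROOFS =====
theorem procesarLoop_eq (numeros : List Int) :
    ∀ pos neg cuad et, procesarLoop numeros pos neg cuad et =
      (pos ++ numeros.filter (fun n => decide (n > 0)),
       neg ++ numeros.filter (fun n => decide (n < 0)),
       cuad ++ numeros.map (fun n => n ^ 2),
       et ++ numeros.map (fun n => if n > 0 then "positivo" else "negativo")) := by
  induction numeros with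
  | nil => intro pos neg cuad et; simp [procesarLoop]
  | cons n rest ih =>
      intro pos neg cuad et
      by_cases h : n > 0
      · have h' : ¬ n < 0 := by omega
        simp [procesarLoop, h, h', ih, pow_two]
      · simp [procesarLoop, h, ih, List.filter_cons, pow_two]
        split_ifs with h2 <;> simp

-- ===== VERDICT (by name: the statement is the Claim_ definition above) =====
theorem procesar_lista_spec : Claim_equal_procesar_lista := by
  intro numeros _
  unfold Spec_procesar_lista procesar_lista procesar_lista_alt
  simp [procesarLoop_eq]
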